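-- pv_equiv track=rewrite | github.com/FabianTinkl/AbletonMCP | mcp_server/handlers/effects.py | _categorize_device
-- ===== SOURCE A (Python) =====
-- def _categorize_device(device_name: str) -> str:
--     """Categorize a device by name."""
--     name_lower = device_name.lower()
--     if "eq" in name_lower:
--         return "eq"
--     elif any(word in name_lower for word in ["comp", "gate", "limit"]):
--         return "dynamics"
--     elif any(word in name_lower for word in ["reverb", "conv"]):
--         return "reverb"
--     elif any(word in name_lower for word in ["delay", "echo"]):
--         return "delay"
--     elif any(word in name_lower for word in ["chorus", "phaser", "flanger"]):
--         return "modulation"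
--     elif any(word in name_lower for word in ["satur", "overdrive", "distort"]):
--         return "distortion"
--     elif any(word in name_lower for word in ["filter", "auto"]):
--         return "filter"
--     else:
--         return "utility"
-- ===== SOURCE B (Python) =====
-- # B: staged algorithm — one scan over string positions collects every matched category
-- # via a flat keyword->category map, then a priority pass picks the winning category (objective: alternative).
-- _KW = {
--     "eq": "eq",
--     "comp": "dynamics", "gate": "dynamics", "limit": "dynamics",
--     "reverb": "reverb", "conv": "reverb",
--     "delay": "delay", "echo": "delay",
--     "chorus": "modulation", "phaser": "modulation", "flanger": "modulation",
--     "satur": "distortion", "overdrive": "distortion", "distort": "distortion",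
--     "filter": "filter", "auto": "filter",
-- }
-- _PRIORITY = ["eq", "dynamics", "reverb", "delay", "modulation", "distortion", "filter"]
--
-- def _categorize_device(device_name: str) -> str:
--     low = device_name.lower()
--     found = set()
--     for i in range(len(low)):
--         for kw, cat in _KW.items():
--             if low.startswith(kw, i):
--                 found.add(cat)
--     for cat in _PRIORITY:
--         if cat in found:
--             return cat
--     return "utility"
-- ===== Notes on version B (the rewrite author's own statement) =====
-- stated objective: alternative
-- what changed: Replaces the per-category substring cascade with a two-stage algorithm: one scan over string positions collects every matched category through a flat keyword-to-category map, then a priority list pass picks the winning category.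
import Mathlib
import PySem

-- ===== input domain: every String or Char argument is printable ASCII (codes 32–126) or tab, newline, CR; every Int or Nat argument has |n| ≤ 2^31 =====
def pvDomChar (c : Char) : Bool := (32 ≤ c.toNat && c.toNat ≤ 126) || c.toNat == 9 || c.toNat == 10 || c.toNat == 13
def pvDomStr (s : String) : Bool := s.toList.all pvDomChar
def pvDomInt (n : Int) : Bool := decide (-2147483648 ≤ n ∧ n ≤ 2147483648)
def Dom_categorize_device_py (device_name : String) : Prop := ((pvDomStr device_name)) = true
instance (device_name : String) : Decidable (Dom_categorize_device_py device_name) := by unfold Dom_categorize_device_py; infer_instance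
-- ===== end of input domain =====

-- B replaces A's per-category membership cascade with a two-stage algorithm: one scan over
-- string positions collects all matched categories via a flat keyword->category map, then a
-- priority pass picks the winner (objective: alternative).

-- ===== PORT A =====
def categorize_device_py (device_name : String) : String :=
  let name_lower := PySem.Str.lower device_name
  if PySem.Str.isIn "eq" name_lower then "eq"
  else if (["comp", "gate", "limit"] : List String).any (fun word => PySem.Str.isIn word name_lower) then "dynamics"
  else if (["reverb", "conv"] : List String).any (fun word => PySem.Str.isIn word name_lower) then "reverb"
  else if (["delay", "echo"] : List String).any (fun word => PySem.Str.isIn word name_lower) then "delay"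
  else if (["chorus", "phaser", "flanger"] : List String).any (fun word => PySem.Str.isIn word name_lower) then "modulation"
  else if (["satur", "overdrive", "distort"] : List String).any (fun word => PySem.Str.isIn word name_lower) then "distortion"
  else if (["filter", "auto"] : List String).any (fun word => PySem.Str.isIn word name_lower) then "filter"
  else "utility"

-- ===== PORT B =====
def pvKW : List (String × String) :=
  [("eq", "eq"),
   ("comp", "dynamics"), ("gate", "dynamics"), ("limit", "dynamics"),
   ("reverb", "reverb"), ("conv", "reverb"),
   ("delay", "delay"), ("echo", "delay"),
   ("chorus", "modulation"), ("phaser", "modulation"), ("flanger", "modulation"),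
   ("satur", "distortion"), ("overdrive", "distortion"), ("distort", "distortion"),
   ("filter", "filter"), ("auto", "filter")]

def pvPriority : List String :=
  ["eq", "dynamics", "reverb", "delay", "modulation", "distortion", "filter"]

-- `low.startswith(kw, i)` is exactly `kw.toList <+: low.drop i`, i.e. PySem.Chars.startswith (low.drop i) kw.toList.
def pvCollect (low : List Char) : PySem.Set String :=
  (PySem.List.pyRange 0 low.length 1).foldl
    (fun acc i =>
      pvKW.foldl
        (fun a p => if PySem.Chars.startswith (low.drop i.toNat) p.1.toList then PySem.Set.add a p.2 else a)
        acc)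
    PySem.Set.empty

def pvResolve (found : PySem.Set String) : List String → String
  | [] => "utility"
  | c :: rest => if PySem.Set.contains found c then c else pvResolve found rest

def categorize_device_py_alt (device_name : String) : String :=
  let low := (PySem.Str.lower device_name).toList
  pvResolve (pvCollect low) pvPriority

-- ===== PRECONDITION & SPEC =====
def Spec_categorize_device_py (device_name : String) (out : String) : Prop := out = categorize_device_py_alt device_name
instance (device_name : String) (out : String) : Decidable (Spec_categorize_device_py device_name out) := by unfold Spec_categorize_device_py; infer_instance

-- ===== CLAIM (what is proved, stated in full; the proofs are below) =====
def Claim_equal_categorize_device_py : Prop := ∀ (device_name : String), Dom_categorize_device_py device_name → Spec_categorize_device_py device_name (categorize_device_py device_name)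

-- ===== LEMMAS AND PROOFS =====

-- membership after the inner fold over the keyword table
theorem pv_mem_inner (low : List Char) (i : Int) (l : List (String × String)) (acc : PySem.Set String) (c : String) :
    c ∈ l.foldl (fun a p => if PySem.Chars.startswith (low.drop i.toNat) p.1.toList then PySem.Set.add a p.2 else a) acc ↔
      c ∈ acc ∨ ∃ p ∈ l, PySem.Chars.startswith (low.drop i.toNat) p.1.toList = true ∧ p.2 = c := by
  induction l generalizing acc with
  | nil => simp
  | cons p rest ih =>
    simp only [List.foldl_cons, ih]
    by_cases h : PySem.Chars.startswith (low.drop i.toNat) p.1.toList = true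
    · simp only [if_pos h, PySem.Set.mem_add, List.mem_cons]
      constructor
      · rintro ((hc | rfl) | ⟨q, hq, hs, hc⟩)
        · exact Or.inl hc
        · exact Or.inr ⟨p, Or.inl rfl, h, rfl⟩
        · exact Or.inr ⟨q, Or.inr hq, hs, hc⟩
      · rintro (hc | ⟨q, (rfl | hq), hs, hc⟩)
        · exact Or.inl (Or.inl hc)
        · exact Or.inl (Or.inr hc.symm)
        · exact Or.inr ⟨q, hq, hs, hc⟩
    · simp only [if_neg h, List.mem_cons]
      constructor
      · rintro (hc | ⟨q, hq, hs, hc⟩)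
        · exact Or.inl hc
        · exact Or.inr ⟨q, Or.inr hq, hs, hc⟩
      · rintro (hc | ⟨q, (rfl | hq), hs, hc⟩)
        · exact Or.inl hc
        · exact absurd hs h
        · exact Or.inr ⟨q, hq, hs, hc⟩

-- membership after the outer fold over any list of positions
theorem pv_mem_outer (low : List Char) (L : List Int) (acc : PySem.Set String) (c : String) :
    c ∈ L.foldl
        (fun acc i => pvKW.foldl
          (fun a p => if PySem.Chars.startswith (low.drop i.toNat) p.1.toList then PySem.Set.add a p.2 else a) acc)
        acc ↔
      c ∈ acc ∨ ∃ i ∈ L, ∃ p ∈ pvKW, PySem.Chars.startswith (low.drop i.toNat) p.1.toList = true ∧ p.2 = c := by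
  induction L generalizing acc with
  | nil => simp
  | cons j rest ih =>
    simp only [List.foldl_cons, ih, pv_mem_inner]
    constructor
    · rintro (⟨h | h⟩ | h)
      · exact Or.inl h
      · exact Or.inr ⟨j, by simp, h⟩
      · obtain ⟨i, hi, hp⟩ := h; exact Or.inr ⟨i, by simp [hi], hp⟩
    · rintro (h | ⟨i, hi, hp⟩)
      · exact Or.inl (Or.inl h)
      · rcases List.mem_cons.mp hi with rfl | hi
        · exact Or.inl (Or.inr hp)
        · exact Or.inr ⟨i, hi, hp⟩

-- a nonempty keyword is a prefix of some positional suffix iff it is a substring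
theorem pv_exists_pos (low : List Char) (kw : List Char) (hkw : kw ≠ []) :
    (∃ i ∈ PySem.List.pyRange 0 low.length 1, PySem.Chars.startswith (low.drop i.toNat) kw = true) ↔
      PySem.Chars.isIn kw low = true := by
  rw [← PySem.Chars.exists_prefix_drop_iff_isIn]
  constructor
  · rintro ⟨i, _, hs⟩
    exact ⟨i.toNat, (PySem.Chars.startswith_iff _ _).mp hs⟩
  · rintro ⟨j, hj⟩
    have hjlt : j < low.length := by
      by_contra h
      rw [List.drop_eq_nil_of_le (le_of_not_gt h)] at hj
      exact hkw (List.prefix_nil.mp hj)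
    refine ⟨(j : Int), ?_, ?_⟩
    · rw [PySem.List.mem_pyRange_one]
      constructor
      · exact Int.natCast_nonneg j
      · exact_mod_cast hjlt
    · rw [PySem.Chars.startswith_iff]
      simpa using hj

-- membership of a category in the collected set, as a substring condition
theorem pv_mem_collect (low : List Char) (c : String) :
    c ∈ pvCollect low ↔
      ∃ p ∈ pvKW, PySem.Chars.isIn p.1.toList low = true ∧ p.2 = c := by
  unfold pvCollect
  rw [pv_mem_outer]
  simp only [PySem.Set.empty]
  constructor
  · rintro (h | ⟨i, hi, p, hp, hs, hc⟩)
    · simp at h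
    · exact ⟨p, hp, (pv_exists_pos low p.1.toList (by fin_cases hp <;> decide)).mp ⟨i, hi, hs⟩, hc⟩
  · rintro ⟨p, hp, hin, hc⟩
    obtain ⟨i, hi, hs⟩ := (pv_exists_pos low p.1.toList (by fin_cases hp <;> decide)).mpr hin
    exact Or.inr ⟨i, hi, p, hp, hs, hc⟩

-- Bool-level characterization of contains for each priority category
theorem pv_contains_eq (low : List Char) (c : String) :
    PySem.Set.contains (pvCollect low) c =
      (pvKW.filter (fun p => p.2 == c)).any (fun p => PySem.Chars.isIn p.1.toList low) := by
  rw [Bool.eq_iff_iff, PySem.Set.contains_iff, pv_mem_collect, List.any_eq_true]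
  constructor
  · rintro ⟨p, hp, hin, hc⟩
    exact ⟨p, List.mem_filter.mpr ⟨hp, by simp [hc]⟩, hin⟩
  · rintro ⟨p, hp, hin⟩
    obtain ⟨hp1, hp2⟩ := List.mem_filter.mp hp
    exact ⟨p, hp1, hin, by simpa using hp2⟩

-- ===== VERDICT (by name: the statement is the Claim_ definition above) =====
theorem categorize_device_py_spec : Claim_equal_categorize_device_py := by
  intro d _
  unfold Spec_categorize_device_py categorize_device_py categorize_device_py_alt pvPriority
  simp only [pvResolve, pv_contains_eq]
  unfold pvKW
  simp [List.filter_nil, PySem.Str.toList_lower]
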